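-- pv_equiv track=rewrite | github.com/yikyungkim/CBR-FinQA | case_retriever/sampling.py | masked_program
-- ===== SOURCE A (Python) =====
-- def program_tokenization(original_program):
--     original_program = original_program.split(', ')
--     program = []
--     for tok in original_program:
--         cur_tok = ''
--         for c in tok:
--             if c == ')':
--                 if cur_tok != '':
--                     program.append(cur_tok)
--                     cur_tok = ''
--             cur_tok += c
--             if c in ['(', ')']:
--                 program.append(cur_tok)
--                 cur_tok = ''
--         if cur_tok != '':
--             program.append(cur_tok)
--     program.append('EOF')
--     return program
--
-- def arguments(program, constants):
--     args=[]
--     i=0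
--     while i < len(program):
--         if i%4==1:
--             if program[i] not in constants:
--                 args.append('arg1')
--             else:
--                 # args.append(program[i])
--                 if 'const' in program[i]:
--                     args.append('const')
--                 else:
--                     args.append(program[i])
--         elif i%4==2:
--             if program[i] not in constants:
--                 args.append('arg2')
--             else:
--                 # args.append(program[i])
--                 if 'const' in program[i]:
--                     args.append('const')
--                 else:
--                     args.append(program[i])
--         i+=1
--     return args
--
-- def masked_program(program, constants):
--     program = program_tokenization(program)
--     args = arguments(program, constants)
--     i=1
--     j=0
--     while i < len(program):
--         if (i%4)==1 or (i%4)==2: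
--             program[i]=args[j]
--             j+=1
--         i+=1
--     new_program = ""
--     for i in range(len(program)):
--         if (i%4)==1 or (i%4)==3:
--             new_program+=program[i]
--             new_program+=', '
--         else:
--             new_program+=program[i]
--     return new_program
-- ===== SOURCE B (Python) =====
-- def program_tokenization(original_program):
--     original_program = original_program.split(', ')
--     program = []
--     for tok in original_program:
--         cur_tok = ''
--         for c in tok:
--             if c == ')':
--                 if cur_tok != '':
--                     program.append(cur_tok)
--                     cur_tok = ''
--             cur_tok += c
--             if c in ['(', ')']:
--                 program.append(cur_tok)
--                 cur_tok = ''
--         if cur_tok != '':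
--             program.append(cur_tok)
--     program.append('EOF')
--     return program
--
-- def masked_program(program, constants):
--     out = ""
--     for i, tok in enumerate(program_tokenization(program)):
--         m = i % 4
--         if m == 1 or m == 2:
--             if tok not in constants:
--                 v = 'arg1' if m == 1 else 'arg2'
--             elif 'const' in tok:
--                 v = 'const'
--             else:
--                 v = tok
--         else:
--             v = tok
--         out += v
--         if m == 1 or m == 3:
--             out += ', '
--     return out
-- ===== Notes on version B (the rewrite author's own statement) =====
-- stated objective: simpler
-- what changed: Keeps the tokenizer but replaces A's three sequential passes (building an args list, a j-indexed loop mutating the token list, then a join loop) with one single pass over the enumerated tokens that masks each argument token inline and appends it plus its separator to the output string.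
import Mathlib
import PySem

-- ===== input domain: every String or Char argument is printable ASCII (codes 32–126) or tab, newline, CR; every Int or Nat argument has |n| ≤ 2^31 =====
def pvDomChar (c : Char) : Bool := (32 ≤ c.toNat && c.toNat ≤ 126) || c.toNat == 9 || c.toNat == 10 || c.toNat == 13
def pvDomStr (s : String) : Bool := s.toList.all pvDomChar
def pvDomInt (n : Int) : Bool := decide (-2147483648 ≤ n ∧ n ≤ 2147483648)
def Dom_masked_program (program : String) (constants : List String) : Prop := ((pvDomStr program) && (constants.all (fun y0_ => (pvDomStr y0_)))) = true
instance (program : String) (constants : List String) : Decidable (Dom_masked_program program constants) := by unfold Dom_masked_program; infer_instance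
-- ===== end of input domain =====

-- B fuses A's three passes (args list, in-place mask loop, join loop) into one pass over the
-- token list; both share the same tokenizer, so it is defined once and used by both ports.

-- ===== PORT A =====
-- program_tokenization, identical in both Pythons (tokens kept as List Char, turned to String on emit)
def pvTokenize (program : String) : List String :=
  let parts := PySem.Chars.splitOn program.toList (", ".toList)
  let prog := parts.foldl (fun (prog : List String) tok =>
    let st := tok.foldl (fun (st : List String × List Char) c =>
      let prog := st.1
      let cur := st.2
      let st1 : List String × List Char :=
        if c = ')' then (if cur ≠ [] then (prog ++ [String.ofList cur], []) else (prog, cur))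
        else (prog, cur)
      let cur := st1.2 ++ [c]
      if c = '(' ∨ c = ')' then (st1.1 ++ [String.ofList cur], []) else (st1.1, cur)) (prog, [])
    if st.2 ≠ [] then st.1 ++ [String.ofList st.2] else st.1) []
  prog ++ ["EOF"]

-- the duplicated branch body of `arguments` (arg name is the only difference)
def pvMaskArg (constants : List String) (argName : String) (tok : String) : String :=
  if ¬ constants.contains tok then argName
  else if PySem.Str.isIn "const" tok then "const" else tok

-- `arguments`: while i < len(program), appending to args
def pvArgumentsAux (constants : List String) : List String → Nat → List String → List String
  | [], _, args => args
  | tok :: rest, i, args =>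
    if i % 4 = 1 then pvArgumentsAux constants rest (i+1) (args ++ [pvMaskArg constants "arg1" tok])
    else if i % 4 = 2 then pvArgumentsAux constants rest (i+1) (args ++ [pvMaskArg constants "arg2" tok])
    else pvArgumentsAux constants rest (i+1) args

-- the mask loop: i starts at 1; program[i] = args[j], j advancing (args consumed front-to-back)
def pvMaskAux : List String → Nat → List String → List String
  | [], _, _ => []
  | tok :: rest, i, args =>
    if i % 4 = 1 ∨ i % 4 = 2 then args.headD "" :: pvMaskAux rest (i+1) args.tail
    else tok :: pvMaskAux rest (i+1) args

def pvMasked (prog args : List String) : List String :=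
  match prog with
  | [] => []
  | t :: rest => t :: pvMaskAux rest 1 args

-- the join loop: for i in range(len(program))
def pvJoinAux : List String → Nat → String → String
  | [], _, acc => acc
  | tok :: rest, i, acc =>
    if i % 4 = 1 ∨ i % 4 = 3 then pvJoinAux rest (i+1) (acc ++ tok ++ ", ")
    else pvJoinAux rest (i+1) (acc ++ tok)

def masked_program (program : String) (constants : List String) : String :=
  let prog := pvTokenize program
  pvJoinAux (pvMasked prog (pvArgumentsAux constants prog 0 [])) 0 ""

-- ===== PORT B =====
-- one pass over the enumerated token list, accumulating the output string
def pvAltAux (constants : List String) : List String → Nat → String → String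
  | [], _, acc => acc
  | tok :: rest, i, acc =>
    let v :=
      if i % 4 = 1 ∨ i % 4 = 2 then
        if ¬ constants.contains tok then (if i % 4 = 1 then "arg1" else "arg2")
        else if PySem.Str.isIn "const" tok then "const" else tok
      else tok
    let acc := acc ++ v
    let acc := if i % 4 = 1 ∨ i % 4 = 3 then acc ++ ", " else acc
    pvAltAux constants rest (i+1) acc

def masked_program_alt (program : String) (constants : List String) : String :=
  pvAltAux constants (pvTokenize program) 0 ""

-- ===== PRECONDITION & SPEC =====
def Spec_masked_program (program : String) (constants : List String) (out : String) : Prop := out = masked_program_alt program constants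
instance (program : String) (constants : List String) (out : String) : Decidable (Spec_masked_program program constants out) := by unfold Spec_masked_program; infer_instance

-- ===== CLAIM (what is proved, stated in full; the proofs are below) =====
def Claim_equal_masked_program : Prop := ∀ (program : String) (constants : List String), Dom_masked_program program constants → Spec_masked_program program constants (masked_program program constants)

-- ===== LEMMAS AND PROOFS =====

-- the per-index masked value B computes inline
def pvF (constants : List String) (i : Nat) (tok : String) : String :=
  if i % 4 = 1 then pvMaskArg constants "arg1" tok
  else if i % 4 = 2 then pvMaskArg constants "arg2" tok
  else tok

-- the token list after A's mask loop, expressed as an index-aware map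
def pvMapF (constants : List String) : List String → Nat → List String
  | [], _ => []
  | tok :: rest, i => pvF constants i tok :: pvMapF constants rest (i+1)

theorem pvArgumentsAux_append (constants : List String) :
    ∀ (toks : List String) (i : Nat) (args : List String),
      pvArgumentsAux constants toks i args = args ++ pvArgumentsAux constants toks i [] := by
  intro toks
  induction toks with
  | nil => intro i args; simp [pvArgumentsAux]
  | cons tok rest ih =>
    intro i args
    by_cases h1 : i % 4 = 1
    · simp only [pvArgumentsAux, h1, if_pos]
      rw [ih (i+1) (args ++ [pvMaskArg constants "arg1" tok]),
          ih (i+1) ([] ++ [pvMaskArg constants "arg1" tok])]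
      simp
    · by_cases h2 : i % 4 = 2
      · simp only [pvArgumentsAux, h2, if_pos]
        rw [ih (i+1) (args ++ [pvMaskArg constants "arg2" tok]),
            ih (i+1) ([] ++ [pvMaskArg constants "arg2" tok])]
        simp
      · simp only [pvArgumentsAux, h1, h2, ite_false]
        exact ih (i+1) args

theorem pvMaskAux_arguments (constants : List String) :
    ∀ (toks : List String) (i : Nat),
      pvMaskAux toks i (pvArgumentsAux constants toks i []) = pvMapF constants toks i := by
  intro toks
  induction toks with
  | nil => intro i; simp [pvMaskAux, pvMapF]
  | cons tok rest ih =>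
    intro i
    by_cases h1 : i % 4 = 1
    · simp only [pvMaskAux, pvMapF, pvF, pvArgumentsAux, h1, if_pos, true_or]
      rw [pvArgumentsAux_append constants rest (i+1) ([] ++ [pvMaskArg constants "arg1" tok])]
      simp [ih (i+1)]
    · by_cases h2 : i % 4 = 2
      · simp only [pvMaskAux, pvMapF, pvF, pvArgumentsAux, h2, ite_true, or_true]
        rw [pvArgumentsAux_append constants rest (i+1) ([] ++ [pvMaskArg constants "arg2" tok])]
        simp [ih (i+1)]
      · simp [pvMaskAux, pvMapF, pvF, pvArgumentsAux, h1, h2, ih (i+1)]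

theorem pvJoinAux_mapF (constants : List String) :
    ∀ (toks : List String) (i : Nat) (acc : String),
      pvJoinAux (pvMapF constants toks i) i acc = pvAltAux constants toks i acc := by
  intro toks
  induction toks with
  | nil => intro i acc; simp [pvJoinAux, pvMapF, pvAltAux]
  | cons tok rest ih =>
    intro i acc
    have hv : pvF constants i tok =
        (if i % 4 = 1 ∨ i % 4 = 2 then
          if ¬ constants.contains tok then (if i % 4 = 1 then "arg1" else "arg2")
          else if PySem.Str.isIn "const" tok then "const" else tok
        else tok) := by
      unfold pvF pvMaskArg
      by_cases h1 : i % 4 = 1 <;> by_cases h2 : i % 4 = 2 <;> simp [h1, h2]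
    simp only [pvMapF, pvJoinAux, pvAltAux, ← hv]
    by_cases hs : i % 4 = 1 ∨ i % 4 = 3
    · simp only [hs, if_pos]; exact ih (i+1) _
    · simp only [hs, ite_false]; exact ih (i+1) _

theorem masked_program_eq_alt (program : String) (constants : List String) :
    masked_program program constants = masked_program_alt program constants := by
  unfold masked_program masked_program_alt
  cases htoks : pvTokenize program with
  | nil => simp [pvMasked, pvJoinAux, pvAltAux]
  | cons t rest =>
    simp only [pvMasked, pvArgumentsAux]
    norm_num
    rw [pvMaskAux_arguments constants rest 1]
    show pvJoinAux (t :: pvMapF constants rest 1) 0 "" = pvAltAux constants (t :: rest) 0 ""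
    simp only [pvJoinAux, pvAltAux]
    norm_num
    exact pvJoinAux_mapF constants rest 1 ("" ++ t)

-- ===== VERDICT (by name: the statement is the Claim_ definition above) =====
theorem masked_program_spec : Claim_equal_masked_program := by
  intro program constants _
  unfold Spec_masked_program
  exact masked_program_eq_alt program constants
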